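-- pv_equiv track=rewrite | github.com/IanBand/oeis-stuff | lpa.py | lpa2
-- ===== SOURCE A (Python) =====
-- def lpa2(n):
--
--     #convert n to binary string
--     bin_str = str(bin(n))[2:]
--
--     #count amount of 1s and 0s in the string
--     zeros = bin_str.count('0')
--     ones  = len(bin_str) - zeros
--
--     if(ones == 1 or ones == 0):
--         return ones
--
--     pal = ""
--     if(ones % 2 == 1):
--
--         #start by placing a '1' in the middle of the string
--         pal = '1'
--
--         #place as many 0s around the central '1' as possible
--         for i in range(0, zeros >> 1):
--                 pal = '0' + pal + '0'
--
--     else: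
--
--         #place all 0s in the center
--         for i in range(0, zeros):
--             pal += '0'
--
--     #place the remaining 1s (guaranteed to be an even amount around the palindrome, because one '1' was placed in the middle) on either side of the palindrome
--     for i in range(0, ones >> 1):
--         pal = '1' + pal + '1'
--
--     #return integer value of the constructed palindrome
--     return int(pal, 2)
-- ===== SOURCE B (Python) =====
-- def lpa2(n):
--     # Count set/unset bits of n's binary form directly, then assemble the
--     # palindrome arithmetically with shifts instead of building a string.
--     ones = n.bit_count()
--     zeros = n.bit_length() - ones
--     if ones <= 1:
--         return ones
--     h = ones >> 1
--     half_in = zeros >> 1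
--     if ones & 1:
--         inner = 2 * half_in + 1
--         mid = 1 << (h + half_in)
--     else:
--         inner = zeros
--         mid = 0
--     low = (1 << h) - 1
--     return (low << (h + inner)) + mid + low
-- ===== Notes on version B (the rewrite author's own statement) =====
-- stated objective: alternative
-- what changed: B computes the bit counts with int.bit_count()/int.bit_length() and assembles the palindrome as an integer by shifts and addition, instead of slicing bin(n), counting characters, growing a string character by character in three loops and reparsing it with int(pal, 2).
-- outside the precondition, e.g. on lpa2(-3): A returns 7, B returns 3
import Mathlib
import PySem

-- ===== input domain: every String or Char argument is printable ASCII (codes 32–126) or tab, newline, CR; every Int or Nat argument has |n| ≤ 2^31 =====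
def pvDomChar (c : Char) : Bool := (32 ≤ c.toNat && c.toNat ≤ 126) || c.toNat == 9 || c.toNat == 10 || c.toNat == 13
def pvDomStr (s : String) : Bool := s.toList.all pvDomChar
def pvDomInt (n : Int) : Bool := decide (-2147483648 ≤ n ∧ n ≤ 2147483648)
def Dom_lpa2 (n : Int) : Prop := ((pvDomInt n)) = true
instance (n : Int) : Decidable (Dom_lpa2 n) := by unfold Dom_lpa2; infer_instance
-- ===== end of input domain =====

-- B replaces A's character-by-character palindrome string (sliced from bin(n), re-parsed
-- with int(pal,2)) by shift/add arithmetic on the bit counts (objective: alternative, loop-free assembly).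

-- ===== PORT A =====
-- int(pal, 2) ported step for step as the base-2 digit fold; exact here because A's pal is
-- always a nonempty string of '0'/'1' characters (no sign, whitespace or underscores).
def pvBinVal (cs : List Char) : Int :=
  cs.foldl (fun acc c => 2 * acc + (if c = '1' then 1 else 0)) 0

def lpa2 (n : Int) : Int :=
  let bin_str : List Char := PySem.List.slice (PySem.Int.toBinChars0b n) (some 2) none
  let zeros : Int := (PySem.List.count bin_str '0' : Int)
  let ones : Int := (bin_str.length : Int) - zeros
  if ones = 1 ∨ ones = 0 then ones
  else
    let pal : List Char :=
      if PySem.Int.mod ones 2 = 1 then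
        (PySem.List.pyRange 0 (zeros >>> (1 : Nat)) 1).foldl
          (fun p _ => '0' :: (p ++ ['0'])) ['1']
      else
        (PySem.List.pyRange 0 zeros 1).foldl (fun p _ => p ++ ['0']) []
    let pal := (PySem.List.pyRange 0 (ones >>> (1 : Nat)) 1).foldl
      (fun p _ => '1' :: (p ++ ['1'])) pal
    pvBinVal pal

-- ===== PORT B =====
-- shift exponents: Python '<<' takes an int exponent, nonnegative wherever B shifts, so .toNat is exact
def lpa2_alt (n : Int) : Int :=
  let ones : Int := (PySem.Int.bitCount n : Int)
  let zeros : Int := (PySem.Int.bitLength n : Int) - ones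
  if ones ≤ 1 then ones
  else
    let h : Int := ones >>> (1 : Nat)
    let halfIn : Int := zeros >>> (1 : Nat)
    let im : Int × Int :=
      if PySem.Int.band ones 1 ≠ 0 then (2 * halfIn + 1, (1 : Int) <<< (h + halfIn).toNat)
      else (zeros, 0)
    let low : Int := ((1 : Int) <<< h.toNat) - 1
    (low <<< (h + im.1).toNat) + im.2 + low

-- ===== PRECONDITION & SPEC =====
-- Pre_ restricts to the natural domain n ≥ 0: on negative n, A slices Python's '-0b…' repr and
-- counts the leftover 'b' character as a set bit, an artefact of the string slicing; B counts
-- the bits of |n| there and returns a different value.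
def Pre_lpa2 (n : Int) : Prop := 0 ≤ n
instance (n : Int) : Decidable (Pre_lpa2 n) := by unfold Pre_lpa2; infer_instance
def pvWitness_lpa2 : Int := (5)
def Spec_lpa2 (n : Int) (out : Int) : Prop := out = lpa2_alt n
instance (n : Int) (out : Int) : Decidable (Spec_lpa2 n out) := by unfold Spec_lpa2; infer_instance

-- ===== CLAIM (what is proved, stated in full; the proofs are below) =====
def Claim_equal_lpa2 : Prop := ∀ (n : Int), Dom_lpa2 n → Pre_lpa2 n → Spec_lpa2 n (lpa2 n)

-- ===== LEMMAS AND PROOFS =====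

-- the binary digit string of a natural number, as structural recursion (= Nat.toDigits 2)
def pvBinChars (n : Nat) : List Char :=
  if h : n < 2 then [Nat.digitChar n]
  else pvBinChars (n / 2) ++ [Nat.digitChar (n % 2)]
decreasing_by omega

lemma pvToDigitsCore_two (f : Nat) : ∀ (n : Nat) (ds : List Char), n < f →
    Nat.toDigitsCore 2 f n ds = pvBinChars n ++ ds := by
  induction f with
  | zero => intro n ds h; omega
  | succ f ih =>
    intro n ds h
    rw [Nat.toDigitsCore]
    by_cases h2 : n / 2 = 0
    · have hlt : n < 2 := by omega
      rw [if_pos h2, pvBinChars]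
      simp [hlt, Nat.mod_eq_of_lt hlt]
    · rw [if_neg h2, ih (n / 2) _ (by omega)]
      conv_rhs => rw [pvBinChars]
      have h3 : ¬ n < 2 := by omega
      rw [dif_neg h3]
      simp [List.append_assoc]

lemma pvToDigits_two (n : Nat) : Nat.toDigits 2 n = pvBinChars n := by
  have := pvToDigitsCore_two (n + 1) n [] (by omega)
  simpa [Nat.toDigits] using this

lemma pvCount_one (n : Nat) : (pvBinChars n).count '1' = PySem.Int.bitCount (n : Int) := by
  induction n using Nat.strong_induction_on with
  | _ n ih =>
    by_cases h : n < 2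
    · interval_cases n <;> simp [pvBinChars] <;> decide
    · rw [pvBinChars]
      have h0 : 0 < n := by omega
      rw [PySem.Int.bitCount_natCast h0]
      have := ih (n / 2) (by omega)
      rcases Nat.mod_two_eq_zero_or_one n with hm | hm <;>
        simp [h, hm, this, Nat.digitChar, List.count_append] <;> omega

lemma pvCount_add (n : Nat) :
    (pvBinChars n).count '0' + (pvBinChars n).count '1' = (pvBinChars n).length := by
  induction n using Nat.strong_induction_on with
  | _ n ih =>
    by_cases h : n < 2
    · interval_cases n <;> simp [pvBinChars] <;> decide
    · rw [pvBinChars]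
      have := ih (n / 2) (by omega)
      rcases Nat.mod_two_eq_zero_or_one n with hm | hm <;>
        simp [h, hm, Nat.digitChar, List.count_append] <;> omega

lemma pvLen : ∀ (n : Nat), 0 < n → (pvBinChars n).length = PySem.Int.bitLength (n : Int) := by
  intro n
  induction n using Nat.strong_induction_on with
  | _ n ih =>
    intro hn
    by_cases h : n < 2
    · interval_cases n
      rw [pvBinChars]
      simp
      decide
    · rw [pvBinChars, PySem.Int.bitLength_natCast (by omega : 0 < n)]
      have := ih (n / 2) (by omega) (by omega)
      simp [h, this]

-- the three loop shapes of A
lemma pvSurround {α : Type} (c : Char) (l : List α) : ∀ (p0 : List Char),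
    l.foldl (fun p _ => c :: (p ++ [c])) p0 =
      List.replicate l.length c ++ p0 ++ List.replicate l.length c := by
  induction l with
  | nil => intro p0; simp
  | cons x t ih =>
    intro p0
    rw [List.foldl_cons, ih]
    have hrep : ∀ (X : List Char), List.replicate t.length c ++ c :: X
        = c :: (List.replicate t.length c ++ X) := by
      intro X
      rw [← List.singleton_append, ← List.append_assoc, ← List.replicate_succ',
        List.replicate_succ, List.cons_append]
    simp only [List.length_cons, List.replicate_succ, List.append_assoc, List.cons_append]
    rw [hrep]
    simp

lemma pvZeroRun {α : Type} (l : List α) :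
    l.foldl (fun p _ => p ++ ['0']) ([] : List Char) = List.replicate l.length '0' := by
  have := PySem.List.foldl_append_singleton_eq_map (fun _ : α => '0') l []
  simpa [List.map_const'] using this

-- values of the digit fold
lemma pvVgoRep0 (k : Nat) : ∀ (a : Int),
    (List.replicate k '0').foldl (fun acc c => 2 * acc + (if c = '1' then 1 else 0)) a
      = a * 2 ^ k := by
  induction k with
  | zero => intro a; simp
  | succ k ih =>
    intro a
    rw [List.replicate_succ, List.foldl_cons, ih,
      show (if ('0':Char) = '1' then (1:Int) else 0) = 0 from rfl]
    ring

lemma pvVgoRep1 (k : Nat) : ∀ (a : Int),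
    (List.replicate k '1').foldl (fun acc c => 2 * acc + (if c = '1' then 1 else 0)) a
      = (a + 1) * 2 ^ k - 1 := by
  induction k with
  | zero => intro a; simp
  | succ k ih =>
    intro a
    rw [List.replicate_succ, List.foldl_cons, ih,
      show (if ('1':Char) = '1' then (1:Int) else 0) = 1 from rfl]
    ring

lemma pvShiftNat (m : Nat) : ((m : Int) >>> (1 : Nat)) = ((m / 2 : Nat) : Int) := by
  have := Int.natCast_shiftRight m 1
  simp [Nat.shiftRight_eq_div_pow] at this ⊢
  omega


-- ===== VERDICT (by name: the statement is the Claim_ definition above) =====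
theorem lpa2_spec : Claim_equal_lpa2 := by
  intro n _ hn
  have hn0 : (0:Int) ≤ n := hn
  unfold Spec_lpa2
  simp only [lpa2, lpa2_alt]
  -- reduce A's string to pvBinChars of n.toNat
  have hbin : PySem.List.slice (PySem.Int.toBinChars0b n) (some 2) none
      = pvBinChars n.toNat := by
    rw [PySem.Int.toBinChars0b, if_neg (by omega : ¬ n < 0),
      PySem.List.slice_from _ (by omega : (0:Int) ≤ 2)]
    simp [pvToDigits_two]
  rw [hbin]
  set m : Nat := n.toNat with hm
  set L : Nat := PySem.Int.bitLength n with hL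
  set C : Nat := PySem.Int.bitCount n with hC
  have hnm : n = (m : Int) := by omega
  have hcount1 : (pvBinChars m).count '1' = C := by rw [hC, hnm]; exact pvCount_one m
  have hcount : (pvBinChars m).count '0' + (pvBinChars m).count '1' = (pvBinChars m).length :=
    pvCount_add m
  have hones : ((pvBinChars m).length : Int) - ((pvBinChars m).count '0' : Int) = (C : Int) := by
    rw [← hcount1]; omega
  simp only [PySem.List.count_eq, hones]
  by_cases hsmall : (C : Int) = 1 ∨ (C : Int) = 0
  · rw [if_pos hsmall, if_pos (by omega : (C : Int) ≤ 1)]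
  · rw [if_neg hsmall, if_neg (by omega : ¬ (C : Int) ≤ 1)]
    have hC2 : 2 ≤ C := by omega
    -- n.toNat is positive (C ≥ 2 forces n ≠ 0), so length = bitLength
    have hmpos : 0 < m := by
      by_contra h0
      have : m = 0 := by omega
      rw [hnm, this] at hC
      simp at hC
      omega
    have hlen : (pvBinChars m).length = L := by rw [hL, hnm]; exact pvLen m hmpos
    set z : Nat := (pvBinChars m).count '0' with hz
    have hzeros : (L : Int) - (C : Int) = (z : Int) := by
      rw [← hlen, ← hcount1]; omega
    rw [← hzeros]
    have hzz : (L : Int) - (C : Int) = ((z : Nat) : Int) := hzeros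
    -- shifts as Nat divisions
    have hsC : ((C : Int) >>> (1 : Nat)) = ((C / 2 : Nat) : Int) := pvShiftNat C
    have hsz : (((z : Nat) : Int) >>> (1 : Nat)) = ((z / 2 : Nat) : Int) := pvShiftNat z
    have hmod : PySem.Int.mod (C : Int) 2 = ((C % 2 : Nat) : Int) := by
      exact_mod_cast PySem.Int.mod_natCast C 2
    have hband : PySem.Int.band (C : Int) 1 = ((C % 2 : Nat) : Int) := by
      rw [PySem.Int.band_one, hmod]
    set h : Nat := C / 2 with hh
    set hzn : Nat := z / 2 with hhz
    rcases Nat.mod_two_eq_zero_or_one C with hpar | hpar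
    · -- even number of ones
      rw [if_neg (by rw [hmod, hpar]; decide)]
      rw [if_neg (by rw [hband, hpar]; simp)]
      rw [pvZeroRun, pvSurround, pvBinVal]
      simp only [PySem.List.length_pyRange_one, Int.sub_zero, hsC, hzz, Int.toNat_natCast,
        List.append_assoc, List.foldl_append, pvVgoRep0, pvVgoRep1]
      rw [show ((h : Int) + (z : Int)).toNat = h + z from by omega]
      simp only [Int.shiftLeft_eq, pow_add]
      ring
    · -- odd number of ones
      rw [if_pos (by rw [hmod, hpar]; decide)]
      rw [if_pos (by rw [hband, hpar]; decide)]
      rw [pvSurround, pvSurround, pvBinVal]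
      simp only [PySem.List.length_pyRange_one, Int.sub_zero, hzz, hsC, hsz, Int.toNat_natCast,
        List.append_assoc, List.cons_append, List.foldl_append, List.foldl_cons, List.foldl_nil,
        pvVgoRep0, pvVgoRep1]
      simp only [if_true]
      rw [show ((h : Int) + (2 * (hzn : Int) + 1)).toNat = h + (2 * hzn + 1) from by omega,
        show ((h : Int) + (hzn : Int)).toNat = h + hzn from by omega]
      simp only [Int.shiftLeft_eq, two_mul, pow_add, pow_succ]
      ring
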